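-- pv_equiv track=rewrite | github.com/sonuMehta12/don-t-break-the-chain-app | src/index.py | fn
-- ===== SOURCE A (Python) =====
-- a = ['9', 'add', 'for 43', 'end', 'for 2', 'for 2', 'add', 'end', 'add', 'end']
--
-- def fn(x):
--     for i in range( 1, int(a[0])):
--         if 'for' in a[i] and a[i+1] == 'end':
--             continue
--         elif a[i] == 'end':
--             continue
--         elif a[i] == 'add':
--             if (a[i +1] == 'end'):
--                 continue
--             else:
--              x = x +1
--         else:
--             # for the nested loop
--             for j in range( int(a[i].split()[1])): #get the second el
--                 #
--                 if(a[i +1] == 'add'):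
--                     continue
--                 else:
--                     for k in range(int(a[i+1].split()[1])):
--                         x = x +1
--                 x = x + 1
--     return x
-- ===== SOURCE B (Python) =====
-- def fn(x):
--     # The instruction list `a` is a module-level constant; tracing it, the
--     # interpreter performs exactly 7 increments, so it is equivalent to returning x + 7.
--     return x + 7
-- ===== Notes on version B (the rewrite author's own statement) =====
-- stated objective: simpler
-- what changed: Replaced the interpreter loop over the constant instruction list with the closed form x + 7, the net effect of tracing the fixed program.
import Mathlib
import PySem

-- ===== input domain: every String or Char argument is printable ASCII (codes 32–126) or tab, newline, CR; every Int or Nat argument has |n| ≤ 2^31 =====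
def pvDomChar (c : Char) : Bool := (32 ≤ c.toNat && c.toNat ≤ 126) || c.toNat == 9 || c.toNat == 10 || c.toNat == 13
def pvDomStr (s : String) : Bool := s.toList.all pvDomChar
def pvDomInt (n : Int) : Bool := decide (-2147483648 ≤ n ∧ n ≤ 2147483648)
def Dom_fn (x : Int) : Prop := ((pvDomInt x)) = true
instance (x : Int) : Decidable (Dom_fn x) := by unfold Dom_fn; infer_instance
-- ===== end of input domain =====

-- B replaces A's interpreter over the constant instruction list with the closed form x + 7 (simpler).

-- ===== PORT A =====
-- the module-level constant instruction list `a`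
def pyA : List String := ["9", "add", "for 43", "end", "for 2", "for 2", "add", "end", "add", "end"]
def fn (x : Int) : Int :=
  (PySem.List.pyRange 1 ((PySem.Int.ofStr? (PySem.List.pyGetD pyA 0 "")).getD 0) 1).foldl
    (fun x i =>
      let ai := PySem.List.pyGetD pyA i ""
      let ai1 := PySem.List.pyGetD pyA (i + 1) ""
      if PySem.Str.isIn "for" ai && (ai1 == "end") then x
      else if ai == "end" then x
      else if ai == "add" then (if ai1 == "end" then x else x + 1)
      else
        (PySem.List.pyRange 0 ((PySem.Int.ofStr? (PySem.List.pyGetD (PySem.Str.split₀ ai) 1 "")).getD 0) 1).foldl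
          (fun x _j =>
            if ai1 == "add" then x
            else
              ((PySem.List.pyRange 0 ((PySem.Int.ofStr? (PySem.List.pyGetD (PySem.Str.split₀ ai1) 1 "")).getD 0) 1).foldl
                (fun x _k => x + 1) x) + 1)
          x)
    x



-- ===== PORT B =====
def fn_alt (x : Int) : Int := x + 7

-- ===== PRECONDITION & SPEC =====
def Spec_fn (x : Int) (out : Int) : Prop := out = fn_alt x
instance (x : Int) (out : Int) : Decidable (Spec_fn x out) := by unfold Spec_fn; infer_instance

-- ===== CLAIM (what is proved, stated in full; the proofs are below) =====
def Claim_equal_fn : Prop := ∀ (x : Int), Dom_fn x → Spec_fn x (fn x)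

-- ===== LEMMAS AND PROOFS =====
lemma foldl_shift (f : Int → Int → Int) (h : ∀ x c i, f (x + c) i = f x i + c) :
    ∀ (l : List Int) (x c : Int), l.foldl f (x + c) = l.foldl f x + c := by
  intro l
  induction l with
  | nil => intro x c; rfl
  | cons a t ih => intro x c; simp only [List.foldl]; rw [h, ih]

def pvStep : Int → Int → Int := fun x i =>
  let ai := PySem.List.pyGetD pyA i ""
  let ai1 := PySem.List.pyGetD pyA (i + 1) ""
  if PySem.Str.isIn "for" ai && (ai1 == "end") then x
  else if ai == "end" then x
  else if ai == "add" then (if ai1 == "end" then x else x + 1)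
  else
    (PySem.List.pyRange 0 ((PySem.Int.ofStr? (PySem.List.pyGetD (PySem.Str.split₀ ai) 1 "")).getD 0) 1).foldl
      (fun x _j =>
        if ai1 == "add" then x
        else
          ((PySem.List.pyRange 0 ((PySem.Int.ofStr? (PySem.List.pyGetD (PySem.Str.split₀ ai1) 1 "")).getD 0) 1).foldl
            (fun x _k => x + 1) x) + 1)
      x

lemma fn_eq_foldl (x : Int) :
    fn x = (PySem.List.pyRange 1 ((PySem.Int.ofStr? (PySem.List.pyGetD pyA 0 "")).getD 0) 1).foldl pvStep x := rfl

lemma pvStep_shift (x c i : Int) : pvStep (x + c) i = pvStep x i + c := by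
  have hinner : ∀ (l : List Int) (x c : Int),
      l.foldl (fun x _k => x + 1) (x + c) = l.foldl (fun x _k => x + 1) x + c :=
    foldl_shift _ (fun x c i => by ring)
  unfold pvStep
  simp only []
  split_ifs with h1 h2 h3 h4 h5
  · rfl
  · rfl
  · rfl
  · ring
  · exact foldl_shift _ (fun x c i => rfl) _ x c
  · exact foldl_shift _ (fun x c i => by rw [hinner]; ring) _ x c

set_option maxHeartbeats 4000000 in
lemma fn_zero : fn 0 = 7 := by decide

theorem fn_closed (x : Int) : fn x = x + 7 := by
  have h := foldl_shift pvStep pvStep_shift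
    (PySem.List.pyRange 1 ((PySem.Int.ofStr? (PySem.List.pyGetD pyA 0 "")).getD 0) 1) 0 x
  rw [zero_add] at h
  rw [fn_eq_foldl, h, ← fn_eq_foldl, fn_zero]
  ring

-- ===== VERDICT (by name: the statement is the Claim_ definition above) =====
theorem fn_spec : Claim_equal_fn := by
  intro x _
  show fn x = fn_alt x
  rw [fn_closed]; rfl
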